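-- pv_equiv track=rewrite | github.com/jk960903/StudyWith | Simbean/python/programmers/p64064 불량 사용자.py | dfs
-- ===== SOURCE A (Python) =====
-- def dfs(arr, b = None, idx = None,
--         cnt = None, q = None, qq = None):
--     if q == None:
--         q = []
--     if cnt == None:
--         cnt = 0
--     if b == None:
--         b = 0
--     if idx == None:
--         idx = 0
--     if qq == None:
--         qq = []
--     if idx == len(arr):
--         Temp = q[:]
--         Temp.sort()
--         qq.append(tuple(Temp))
--         return qq
--     for i in arr[idx]:
--         if b & (1 << i) == 0:
--             q.append(i)
--             b = b | (1 << i)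
--             cnt = dfs(arr, b, idx + 1, cnt, q, qq)
--             t = q.pop()
--             b = b & ~(1 << t)
--     return qq
-- ===== SOURCE B (Python) =====
-- def dfs(arr, b = None, idx = None,
--         cnt = None, q = None, qq = None):
--     b0 = 0 if b is None else b
--     i0 = 0 if idx is None else idx
--     q0 = [] if q is None else q
--     qq0 = [] if qq is None else qq
--     combos = [[]]
--     for lst in arr[i0:]:
--         combos = [c + [i] for c in combos for i in lst]
--     out = list(qq0)
--     for c in combos:
--         if len(set(c)) == len(c) and all((b0 >> i) % 2 == 0 for i in c):
--             out.append(tuple(sorted(q0 + c)))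
--     return out
-- ===== Notes on version B (the rewrite author's own statement) =====
-- stated objective: alternative
-- what changed: Replaces A's pruned recursive backtracking over a shared bitmask/stack with a non-recursive generate-and-filter pass: build the full cartesian product of arr[idx:] with an iterative list comprehension, then keep exactly the candidates whose entries are pairwise distinct and unset in the initial mask; A also mutates the caller's qq (and transiently q) in place, B only returns the same value.
-- outside the precondition, e.g. on dfs([[1], [2]], 0, -1, 0, [], []): A returns [], B returns [(2,)]; on dfs([[0], [-1]], 1, 0, 0, [], []): A returns [], B returns []
import Mathlib
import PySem

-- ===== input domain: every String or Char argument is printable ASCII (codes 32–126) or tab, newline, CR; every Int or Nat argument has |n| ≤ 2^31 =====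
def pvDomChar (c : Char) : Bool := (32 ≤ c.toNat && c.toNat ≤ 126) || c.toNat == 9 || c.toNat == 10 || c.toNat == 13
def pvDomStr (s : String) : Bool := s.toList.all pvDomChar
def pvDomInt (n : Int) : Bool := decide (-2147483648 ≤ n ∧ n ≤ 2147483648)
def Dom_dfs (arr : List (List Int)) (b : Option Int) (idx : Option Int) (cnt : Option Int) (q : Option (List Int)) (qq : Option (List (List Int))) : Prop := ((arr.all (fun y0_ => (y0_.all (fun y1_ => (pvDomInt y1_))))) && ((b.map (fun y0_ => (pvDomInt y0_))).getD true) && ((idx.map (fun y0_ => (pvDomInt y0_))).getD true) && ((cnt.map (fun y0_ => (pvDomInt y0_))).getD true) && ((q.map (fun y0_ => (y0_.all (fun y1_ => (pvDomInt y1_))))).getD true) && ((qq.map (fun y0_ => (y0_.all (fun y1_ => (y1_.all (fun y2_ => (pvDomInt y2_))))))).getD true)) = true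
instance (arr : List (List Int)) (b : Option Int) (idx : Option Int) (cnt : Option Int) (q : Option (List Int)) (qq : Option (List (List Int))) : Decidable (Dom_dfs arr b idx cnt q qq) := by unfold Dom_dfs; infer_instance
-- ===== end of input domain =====

-- B replaces A's pruned recursive backtracking by a generate-and-filter pass (build the
-- full cartesian product of the sublists iteratively, then keep the candidates whose
-- indices are distinct and unset in the initial mask); same return value, but A also
-- mutates the caller's `qq` (and `q` transiently) in place while B does not — the
-- equivalence proved here is about the return value only.  Objective: alternative.

-- ===== PORT A =====
-- `1 << i`: exact for 0 ≤ i (Python raises ValueError on a negative shift; Pre_ excludes that)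
def pyShl (i : Int) : Int := (1 : Int) <<< i.toNat

-- the recursion of A, fuel = number of levels left (len(arr) - idx under Pre_);
-- the Python `cnt` is assigned but never influences the result, so it is not threaded
mutual
-- one iteration of A's `for i in arr[idx]` body on the state (b, q, qq)
def dfsStep (arr : List (List Int)) (fuel : Nat) (idxs : Int)
    (s : Int × List Int × List (List Int)) (i : Int) : Int × List Int × List (List Int) :=
  if PySem.Int.band s.1 (pyShl i) = 0 then
    let q' := s.2.1 ++ [i]
    let b' := PySem.Int.bor s.1 (pyShl i)
    let qq' := dfsGo arr fuel b' idxs q' s.2.2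
    match PySem.List.pop? q' with
    | some (t, q'') => (PySem.Int.band b' (Int.not (pyShl t)), q'', qq')
    | none => (b', q', qq')  -- unreachable: q' is nonempty
  else s

def dfsGo (arr : List (List Int)) (fuel : Nat) (b idx : Int) (q : List Int) (qq : List (List Int)) : List (List Int) :=
    if idx = (arr.length : Int) then
      qq ++ [PySem.List.sorted q (fun x => x)]
    else
      match fuel with
      | 0 => qq  -- not reached under Pre_ (A raises IndexError beyond this point)
      | fuel + 1 =>
        match PySem.List.pyGet? arr idx with
        | none => qq  -- IndexError in Python; outside Pre_
        | some l =>
          (l.foldl (dfsStep arr fuel (idx + 1)) (b, q, qq)).2.2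
end

def dfs (arr : List (List Int)) (b : Option Int) (idx : Option Int) (cnt : Option Int) (q : Option (List Int)) (qq : Option (List (List Int))) : List (List Int) :=
  let q0 := q.getD []
  let _cnt0 := cnt.getD 0
  let b0 := b.getD 0
  let idx0 := idx.getD 0
  let qq0 := qq.getD []
  dfsGo arr ((arr.length : Int) - idx0).toNat b0 idx0 q0 qq0

-- ===== PORT B =====
-- `len(set(c)) == len(c)`
def pvDistinct (c : List Int) : Bool := (PySem.Set.ofList c).length == c.length
-- `(b0 >> i) % 2 == 0`: exact for 0 ≤ i (Python raises ValueError on a negative shift)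
def pvBitClear (b0 i : Int) : Bool := PySem.Int.mod (b0 >>> i.toNat) 2 == 0

def dfs_alt (arr : List (List Int)) (b : Option Int) (idx : Option Int) (cnt : Option Int) (q : Option (List Int)) (qq : Option (List (List Int))) : List (List Int) :=
  let b0 := b.getD 0
  let i0 := idx.getD 0
  let q0 := q.getD []
  let qq0 := qq.getD []
  let combos := (PySem.List.slice arr (some i0)).foldl
      (fun cs lst => cs.flatMap (fun c => lst.map (fun i => c ++ [i]))) [[]]
  combos.foldl (fun out c =>
      if pvDistinct c && c.all (fun i => pvBitClear b0 i) then
        out ++ [PySem.List.sorted (q0 ++ c) (fun x => x)]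
      else out) qq0

-- ===== PRECONDITION & SPEC =====
-- Pre_ admits any resume state whose index is in 0..len(arr) and whose reachable
-- sublists arr[idx:] contain only nonnegative entries: a negative entry there makes
-- A raise ValueError via `1 << i` unless pruning hides it (an accident of the mask —
-- see cites), and a negative idx makes A wrap around and revisit levels, an accident
-- of its `idx == len(arr)` termination test; idx > len(arr) is an IndexError.
def Pre_dfs (arr : List (List Int)) (b : Option Int) (idx : Option Int) (cnt : Option Int) (q : Option (List Int)) (qq : Option (List (List Int))) : Prop :=
  0 ≤ idx.getD 0 ∧ idx.getD 0 ≤ (arr.length : Int) ∧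
    ∀ l ∈ arr.drop (idx.getD 0).toNat, ∀ i ∈ l, 0 ≤ i
instance (arr : List (List Int)) (b : Option Int) (idx : Option Int) (cnt : Option Int) (q : Option (List Int)) (qq : Option (List (List Int))) : Decidable (Pre_dfs arr b idx cnt q qq) := by unfold Pre_dfs; infer_instance

def pvWitness_dfs : List (List Int) × Option Int × Option Int × Option Int × Option (List Int) × Option (List (List Int)) :=
  ([[0, 1], [1, 2]], none, none, none, none, none)

def Spec_dfs (arr : List (List Int)) (b : Option Int) (idx : Option Int) (cnt : Option Int) (q : Option (List Int)) (qq : Option (List (List Int))) (out : List (List Int)) : Prop := out = dfs_alt arr b idx cnt q qq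
instance (arr : List (List Int)) (b : Option Int) (idx : Option Int) (cnt : Option Int) (q : Option (List Int)) (qq : Option (List (List Int))) (out : List (List Int)) : Decidable (Spec_dfs arr b idx cnt q qq out) := by unfold Spec_dfs; infer_instance

-- ===== CLAIM (what is proved, stated in full; the proofs are below) =====
def Claim_equal_dfs : Prop := ∀ (arr : List (List Int)) (b : Option Int) (idx : Option Int) (cnt : Option Int) (q : Option (List Int)) (qq : Option (List (List Int))), Dom_dfs arr b idx cnt q qq → Pre_dfs arr b idx cnt q qq → Spec_dfs arr b idx cnt q qq (dfs arr b idx cnt q qq)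

-- ===== LEMMAS AND PROOFS =====

-- the cartesian product of the sublists, front-first (the order the DFS visits)
def prodF : List (List Int) -> List (List Int)
  | [] => [[]]
  | l :: r => l.flatMap (fun i => (prodF r).map (fun c => i :: c))

-- A's incremental validity test along one candidate
def okA (b : Int) : List Int -> Bool
  | [] => true
  | i :: c => (PySem.Int.band b (pyShl i) == 0) && okA (PySem.Int.bor b (pyShl i)) c


-- ---- integer bit lemmas ----

theorem int_eq_of_testBit_eq {a b : Int} (h : ∀ k, a.testBit k = b.testBit k) : a = b := by
  cases a with
  | ofNat m =>
    cases b with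
    | ofNat n =>
      have := Nat.eq_of_testBit_eq (x := m) (y := n) (fun k => by
        have := h k; simpa [Int.testBit] using this)
      simp [this]
    | negSucc n =>
      exfalso
      have hk := h (m + n)
      have hm : Nat.testBit m (m + n) = false :=
        Nat.testBit_lt_two_pow (Nat.lt_of_lt_of_le Nat.lt_two_pow_self
          (Nat.pow_le_pow_right (by omega) (by omega)))
      have hn : Nat.testBit n (m + n) = false :=
        Nat.testBit_lt_two_pow (Nat.lt_of_lt_of_le Nat.lt_two_pow_self
          (Nat.pow_le_pow_right (by omega) (by omega)))
      simp [Int.testBit, hm, hn] at hk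
  | negSucc m =>
    cases b with
    | ofNat n =>
      exfalso
      have hk := h (m + n)
      have hm : Nat.testBit m (m + n) = false :=
        Nat.testBit_lt_two_pow (Nat.lt_of_lt_of_le Nat.lt_two_pow_self
          (Nat.pow_le_pow_right (by omega) (by omega)))
      have hn : Nat.testBit n (m + n) = false :=
        Nat.testBit_lt_two_pow (Nat.lt_of_lt_of_le Nat.lt_two_pow_self
          (Nat.pow_le_pow_right (by omega) (by omega)))
      simp [Int.testBit, hm, hn] at hk
    | negSucc n =>
      have := Nat.eq_of_testBit_eq (x := m) (y := n) (fun k => by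
        have := h k; simpa [Int.testBit] using this)
      simp [this]

theorem nat_or_eq_add (a b : Nat) (h : a &&& b = 0) : a ||| b = a + b := by
  induction a using Nat.strong_induction_on generalizing b with
  | _ a ih =>
    rcases Nat.eq_zero_or_pos a with ha | ha
    · simp [ha]
    · have h2 : a / 2 &&& b / 2 = 0 := by
        rw [← Nat.and_div_two, h]
      have ih2 := ih (a / 2) (Nat.div_lt_self ha (by omega)) (b / 2) h2
      have e1 : (a ||| b) / 2 = a / 2 ||| b / 2 := Nat.or_div_two
      have e2 : (a ||| b) % 2 = 1 ↔ (a % 2 = 1 ∨ b % 2 = 1) := by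
        have := Nat.testBit_or a b 0
        simpa [Nat.testBit_zero, Bool.or_eq_true, decide_eq_true_eq] using
          congrArg (· = true) this |>.to_iff
      have e3 : ¬(a % 2 = 1 ∧ b % 2 = 1) := by
        have := Nat.testBit_and a b 0
        rw [h] at this
        simp [Nat.testBit_zero, decide_eq_true_eq] at this
        omega
      omega

theorem ldiff_eq_sub (m n : Nat) : m.ldiff n = m - (m &&& n) := by
  have h1 : m.ldiff n &&& (m &&& n) = 0 := by
    apply Nat.eq_of_testBit_eq
    intro k
    simp [Nat.testBit_ldiff, Nat.testBit_and, Nat.zero_testBit]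
    cases m.testBit k <;> cases n.testBit k <;> simp
  have h2 : m.ldiff n ||| (m &&& n) = m := by
    apply Nat.eq_of_testBit_eq
    intro k
    simp [Nat.testBit_ldiff, Nat.testBit_and, Nat.testBit_or]
    cases m.testBit k <;> cases n.testBit k <;> simp
  have h3 := nat_or_eq_add _ _ h1
  have h4 : m &&& n ≤ m := Nat.and_le_left
  omega

theorem band_eq_land (a b : Int) : PySem.Int.band a b = Int.land a b := by
  cases a with
  | ofNat m =>
    cases b with
    | ofNat n => simp [PySem.Int.band, Int.land]
    | negSucc n =>
      simp [PySem.Int.band, Int.land, ldiff_eq_sub, Int.negSucc_eq]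
      omega
  | negSucc m =>
    cases b with
    | ofNat n =>
      simp [PySem.Int.band, Int.land, ldiff_eq_sub, Nat.and_comm, Int.negSucc_eq]
      omega
    | negSucc n =>
      simp [PySem.Int.band, Int.land, Int.negSucc_eq]
      omega

theorem bor_eq_lor (a b : Int) : PySem.Int.bor a b = Int.lor a b := by
  cases a with
  | ofNat m =>
    cases b with
    | ofNat n => simp [PySem.Int.bor, Int.lor]
    | negSucc n =>
      simp [PySem.Int.bor, Int.lor, ldiff_eq_sub, Nat.and_comm, Int.negSucc_eq]
      omega
  | negSucc m =>
    cases b with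
    | ofNat n =>
      simp [PySem.Int.bor, Int.lor, ldiff_eq_sub, Nat.and_comm, Int.negSucc_eq]
      omega
    | negSucc n =>
      simp [PySem.Int.bor, Int.lor, Int.negSucc_eq]
      omega

theorem pyShl_eq (i : Int) : pyShl i = ((2 ^ i.toNat : Nat) : Int) := by
  simp [pyShl, Int.shiftLeft_eq']

theorem testBit_pyShl (i : Int) (k : Nat) : (pyShl i).testBit k = decide (i.toNat = k) := by
  rw [pyShl_eq]
  simpa [Int.testBit] using Nat.testBit_two_pow (n := i.toNat) (m := k)

theorem band_pyShl_eq_zero_iff (b i : Int) :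
    PySem.Int.band b (pyShl i) = 0 ↔ b.testBit i.toNat = false := by
  rw [pyShl_eq, band_eq_land]
  cases b with
  | ofNat m =>
    simp [Int.land, Int.testBit, Nat.and_two_pow]
    try (rcases h : m.testBit i.toNat <;> simp [h] <;> positivity)
  | negSucc m =>
    simp [Int.land, Int.testBit, ldiff_eq_sub, Nat.two_pow_and]
    have h2 : 0 < 2 ^ i.toNat := by positivity
    rcases h : m.testBit i.toNat <;> simp [h] <;> omega

theorem band_bor_pyShl_eq_zero_iff (b i j : Int) :
    PySem.Int.band (PySem.Int.bor b (pyShl i)) (pyShl j) = 0 ↔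
      (PySem.Int.band b (pyShl j) = 0 ∧ i.toNat ≠ j.toNat) := by
  rw [band_pyShl_eq_zero_iff, band_pyShl_eq_zero_iff, bor_eq_lor, Int.testBit_lor,
    testBit_pyShl]
  rcases h : b.testBit j.toNat <;> by_cases hij : i.toNat = j.toNat <;> simp [h, hij]

theorem band_bor_not_restore (b i : Int) (h : PySem.Int.band b (pyShl i) = 0) :
    PySem.Int.band (PySem.Int.bor b (pyShl i)) (Int.not (pyShl i)) = b := by
  have hb : b.testBit i.toNat = false := (band_pyShl_eq_zero_iff b i).mp h
  have hnot : Int.not (pyShl i) = Int.lnot (pyShl i) := by cases (pyShl i) <;> rfl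
  rw [band_eq_land, bor_eq_lor, hnot]
  apply int_eq_of_testBit_eq
  intro k
  rw [Int.testBit_land, Int.testBit_lor, Int.testBit_lnot, testBit_pyShl]
  by_cases hk : i.toNat = k
  · subst hk; simp [hb]
  · simp [hk]

theorem bor_right_comm (b x y : Int) :
    PySem.Int.bor (PySem.Int.bor b x) y = PySem.Int.bor (PySem.Int.bor b y) x := by
  simp only [bor_eq_lor]
  apply int_eq_of_testBit_eq
  intro k
  simp only [Int.testBit_lor]
  cases b.testBit k <;> cases x.testBit k <;> cases y.testBit k <;> rfl

theorem testBit_ofNat (m : Nat) (n : Nat) : (Int.ofNat m).testBit n = m.testBit n := rfl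

theorem testBit_negSucc (m : Nat) (n : Nat) : (Int.negSucc m).testBit n = !m.testBit n := rfl

theorem pvBitClear_eq (b : Int) (i : Int) : pvBitClear b i = !b.testBit i.toNat := by
  unfold pvBitClear
  cases b with
  | ofNat m =>
    rw [show (Int.ofNat m) >>> i.toNat = Int.ofNat (m >>> i.toNat) from rfl, testBit_ofNat,
      show PySem.Int.mod (Int.ofNat (m >>> i.toNat)) 2 = ((m >>> i.toNat) % 2 : Nat) by
        simpa using PySem.Int.mod_natCast (m >>> i.toNat) 2,
      show m.testBit i.toNat = decide ((m >>> i.toNat) % 2 = 1) by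
        rw [Nat.testBit_eq_decide_div_mod_eq, Nat.shiftRight_eq_div_pow]]
    rcases Nat.mod_two_eq_zero_or_one (m >>> i.toNat) with h | h <;> simp [h]
  | negSucc m =>
    rw [show (Int.negSucc m) >>> i.toNat = Int.negSucc (m >>> i.toNat) from rfl, testBit_negSucc,
      show PySem.Int.mod (Int.negSucc (m >>> i.toNat)) 2 = (Int.negSucc (m >>> i.toNat)) % 2 from
        PySem.Int.mod_eq_emod_of_pos (by omega),
      show m.testBit i.toNat = decide ((m >>> i.toNat) % 2 = 1) by
        rw [Nat.testBit_eq_decide_div_mod_eq, Nat.shiftRight_eq_div_pow]]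
    have h4 : (Int.negSucc (m >>> i.toNat)) % 2 = 1 - (((m >>> i.toNat) % 2 : Nat) : Int) := by
      rw [Int.negSucc_eq]
      conv_lhs => rw [← Nat.div_add_mod (m >>> i.toNat) 2]
      push_cast
      omega
    rw [h4]
    rcases Nat.mod_two_eq_zero_or_one (m >>> i.toNat) with h | h <;> simp [h]

theorem pvBitClear_iff (b i : Int) :
    pvBitClear b i = true ↔ PySem.Int.band b (pyShl i) = 0 := by
  rw [pvBitClear_eq, band_pyShl_eq_zero_iff]
  cases b.testBit i.toNat <;> simp

-- ---- candidate products and the validity predicate ----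

theorem mem_prodF {rest : List (List Int)} {c : List Int} (hc : c ∈ prodF rest) :
    ∀ i ∈ c, ∃ l ∈ rest, i ∈ l := by
  induction rest generalizing c with
  | nil =>
    simp [prodF] at hc
    subst hc
    simp
  | cons l r ih =>
    simp only [prodF, List.mem_flatMap, List.mem_map] at hc
    obtain ⟨j, hj, d, hd, rfl⟩ := hc
    intro i hi
    rcases List.mem_cons.mp hi with rfl | hi
    · exact ⟨l, by simp, hj⟩
    · obtain ⟨l', hl', hil'⟩ := ih hd i hi
      exact ⟨l', by simp [hl'], hil'⟩

theorem okA_bor_iff (b i : Int) (c : List Int) (hi : 0 ≤ i) (hc : ∀ j ∈ c, 0 ≤ j) :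
    okA (PySem.Int.bor b (pyShl i)) c = true ↔ (okA b c = true ∧ ∀ j ∈ c, j ≠ i) := by
  induction c generalizing b with
  | nil => simp [okA]
  | cons j c ih =>
    have hj : 0 ≤ j := hc j (by simp)
    have hc' : ∀ x ∈ c, 0 ≤ x := fun x hx => hc x (by simp [hx])
    simp only [okA, Bool.and_eq_true, beq_iff_eq]
    rw [bor_right_comm]
    rw [ih (PySem.Int.bor b (pyShl j)) hc']
    rw [band_bor_pyShl_eq_zero_iff]
    constructor
    · rintro ⟨⟨h1, h2⟩, h3, h4⟩
      refine ⟨⟨h1, h3⟩, ?_⟩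
      intro x hx
      rcases List.mem_cons.mp hx with rfl | hx
      · intro hxi; apply h2; omega
      · exact h4 x hx
    · rintro ⟨⟨h1, h3⟩, h4⟩
      have hji : j ≠ i := h4 j (by simp)
      exact ⟨⟨h1, by omega⟩, h3, fun x hx => h4 x (by simp [hx])⟩

theorem okA_iff (b : Int) (c : List Int) (hc : ∀ j ∈ c, 0 ≤ j) :
    okA b c = true ↔ (c.Nodup ∧ ∀ j ∈ c, PySem.Int.band b (pyShl j) = 0) := by
  induction c generalizing b with
  | nil => simp [okA]
  | cons j c ih =>
    have hj : 0 ≤ j := hc j (by simp)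
    have hc' : ∀ x ∈ c, 0 ≤ x := fun x hx => hc x (by simp [hx])
    simp only [okA, Bool.and_eq_true, beq_iff_eq]
    rw [okA_bor_iff b j c hj hc', ih b hc']
    constructor
    · rintro ⟨h0, ⟨hnd, hall⟩, hne⟩
      refine ⟨List.nodup_cons.mpr ⟨fun hmem => (hne j hmem) rfl, hnd⟩, ?_⟩
      intro x hx
      rcases List.mem_cons.mp hx with rfl | hx
      · exact h0
      · exact hall x hx
    · rintro ⟨hnd, hall⟩
      obtain ⟨hjn, hnd'⟩ := List.nodup_cons.mp hnd
      refine ⟨hall j (by simp), ⟨hnd', fun x hx => hall x (by simp [hx])⟩, ?_⟩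
      intro x hx hxj
      exact hjn (hxj ▸ hx)

theorem length_ofList_eq_iff (c : List Int) :
    (PySem.Set.ofList c).length = c.length ↔ c.Nodup := by
  constructor
  · intro h
    induction c with
    | nil => simp
    | cons x xs ih =>
      rw [PySem.Set.ofList_cons] at h
      simp only [List.length_cons] at h
      have hd : ((PySem.Set.ofList xs).discard x).length ≤ (PySem.Set.ofList xs).length :=
        List.length_filter_le _ _
      have hl : (PySem.Set.ofList xs).length ≤ xs.length := PySem.Set.length_ofList_le xs
      have he : ((PySem.Set.ofList xs).discard x).length = xs.length := by omega
      have hx : x ∉ xs := by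
        intro hmem
        have hmem' : x ∈ PySem.Set.ofList xs := (PySem.Set.mem_ofList xs x).mpr hmem
        have : ((PySem.Set.ofList xs).discard x).length < (PySem.Set.ofList xs).length := by
          apply List.length_filter_lt_length_iff_exists.mpr
          exact ⟨x, hmem', by simp⟩
        omega
      exact List.nodup_cons.mpr ⟨hx, ih (by omega)⟩
  · intro h
    rw [PySem.Set.ofList_eq_self_of_nodup c h]

theorem pvDistinct_eq (c : List Int) : pvDistinct c = decide c.Nodup := by
  unfold pvDistinct
  rcases h : decide c.Nodup with _ | _
  · simp only [decide_eq_false_iff_not] at h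
    simp only [beq_iff_eq, Bool.eq_false_iff, ne_eq]
    intro hlen
    exact h ((length_ofList_eq_iff c).mp hlen)
  · simp only [decide_eq_true_eq] at h
    simp [(length_ofList_eq_iff c).mpr h]

-- B's filter test agrees with A's incremental test on nonnegative candidates
theorem pred_eq_okA (b : Int) (c : List Int) (hc : ∀ j ∈ c, 0 ≤ j) :
    (pvDistinct c && c.all (fun i => pvBitClear b i)) = okA b c := by
  rcases h : okA b c with _ | _
  · rw [Bool.eq_false_iff]
    intro hcon
    rw [Bool.and_eq_true, pvDistinct_eq, decide_eq_true_eq, List.all_eq_true] at hcon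
    obtain ⟨hnd, hall⟩ := hcon
    have : okA b c = true := (okA_iff b c hc).mpr
      ⟨hnd, fun j hj => (pvBitClear_iff b j).mp (hall j hj)⟩
    rw [h] at this
    exact Bool.false_ne_true this
  · obtain ⟨hnd, hall⟩ := (okA_iff b c hc).mp h
    rw [Bool.and_eq_true, pvDistinct_eq, decide_eq_true_eq, List.all_eq_true]
    exact ⟨hnd, fun j hj => (pvBitClear_iff b j).mpr (hall j hj)⟩

-- ---- A's recursion computes filter-and-sort over the product ----

theorem dfsGo_spec (arr : List (List Int)) :
    ∀ (rest : List (List Int)) (k : Nat) (b : Int) (q : List Int) (qq : List (List Int)),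
      arr.drop k = rest → k ≤ arr.length →
      (∀ l ∈ rest, ∀ i ∈ l, 0 ≤ i) →
      dfsGo arr (arr.length - k) b (k : Int) q qq =
        qq ++ ((prodF rest).filter (okA b)).map
          (fun c => PySem.List.sorted (q ++ c) (fun x => x)) := by
  intro rest
  induction rest with
  | nil =>
    intro k b q qq hdrop hk _
    have hkl : k = arr.length := by
      have := List.drop_eq_nil_iff.mp hdrop
      omega
    subst hkl
    rw [dfsGo.eq_def]
    rw [if_pos (by push_cast; ring)]
    simp [prodF, okA]
  | cons l r ih =>
    intro k b q qq hdrop hk hnn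
    have hkl : k < arr.length := by
      by_contra hcon
      rw [List.drop_eq_nil_iff.mpr (by omega)] at hdrop
      exact List.cons_ne_nil l r hdrop.symm
    have hfuel : arr.length - k = (arr.length - (k + 1)) + 1 := by omega
    have hget : PySem.List.pyGet? arr (k : Int) = some l := by
      rw [PySem.List.pyGet?_natCast, ← List.head?_drop, hdrop]
      rfl
    rw [dfsGo.eq_def, if_neg (by intro hcon; rw [Int.natCast_inj.mp hcon] at hkl; omega), hfuel]
    simp only [hget]
    have hdrop' : arr.drop (k + 1) = r := by
      have h1 : arr.drop (k + 1) = (arr.drop k).tail := by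
        rw [List.tail_drop]
      rw [h1, hdrop]
      rfl
    have hnn' : ∀ l' ∈ r, ∀ i ∈ l', 0 ≤ i := fun l' hl' => hnn l' (by simp [hl'])
    have hnnl : ∀ i ∈ l, 0 ≤ i := hnn l (by simp)
    -- one loop iteration restores b and q and appends the completions to qq
    have hstep : ∀ (i : Int) (qq' : List (List Int)), 0 ≤ i →
        dfsStep arr (arr.length - (k + 1)) ((k : Int) + 1) (b, q, qq') i =
          (b, q, qq' ++ (if PySem.Int.band b (pyShl i) = 0 then
              ((prodF r).filter (okA (PySem.Int.bor b (pyShl i)))).map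
                (fun c => PySem.List.sorted (q ++ i :: c) (fun x => x))
            else [])) := by
      intro i qq' hi
      by_cases hband : PySem.Int.band b (pyShl i) = 0
      · have hrec : dfsGo arr (arr.length - (k + 1)) (PySem.Int.bor b (pyShl i))
            ((k : Int) + 1) (q ++ [i]) qq' =
            qq' ++ ((prodF r).filter (okA (PySem.Int.bor b (pyShl i)))).map
              (fun c => PySem.List.sorted ((q ++ [i]) ++ c) (fun x => x)) := by
          have h2 := ih (k + 1) (PySem.Int.bor b (pyShl i)) (q ++ [i]) qq' hdrop' (by omega) hnn'
          push_cast at h2 ⊢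
          exact h2
        have hfix : (fun c => PySem.List.sorted ((q ++ [i]) ++ c) (fun x => x)) =
            (fun c => PySem.List.sorted (q ++ i :: c) (fun x => x)) := by
          funext c
          simp
        rw [dfsStep]
        rw [if_pos hband]
        simp only [hrec, hfix, PySem.List.pop?_last, band_bor_not_restore b i hband,
          if_pos hband]
      · rw [dfsStep, if_neg hband, if_neg hband]
        simp
    -- fold the loop over arr[idx]
    have inner : ∀ (l' : List Int), (∀ i ∈ l', 0 ≤ i) → ∀ (qq' : List (List Int)),
        l'.foldl (dfsStep arr (arr.length - (k + 1)) ((k : Int) + 1)) (b, q, qq') =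
          (b, q, qq' ++ l'.flatMap (fun i =>
            if PySem.Int.band b (pyShl i) = 0 then
              ((prodF r).filter (okA (PySem.Int.bor b (pyShl i)))).map
                (fun c => PySem.List.sorted (q ++ i :: c) (fun x => x))
            else [])) := by
      intro l' hl'
      induction l' with
      | nil => intro qq'; simp
      | cons i t iht =>
        intro qq'
        have hi : 0 ≤ i := hl' i (by simp)
        have ht : ∀ x ∈ t, 0 ≤ x := fun x hx => hl' x (by simp [hx])
        simp only [List.foldl_cons]
        rw [hstep i qq' hi, iht ht]
        simp [List.append_assoc]
    rw [inner l hnnl qq]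
    simp only [prodF]
    rw [List.filter_flatMap, List.map_flatMap]
    congr 1
    apply List.flatMap_congr
    intro i _
    rw [List.filter_map]
    by_cases hband : PySem.Int.band b (pyShl i) = 0
    · rw [if_pos hband]
      have hok : (okA b ∘ fun c => i :: c) = (okA (PySem.Int.bor b (pyShl i))) := by
        funext c
        simp [Function.comp, okA, hband]
      have hsort : ((fun c => PySem.List.sorted (q ++ c) (fun x => x)) ∘ fun c => i :: c) =
          (fun c => PySem.List.sorted (q ++ i :: c) (fun x => x)) := by
        funext c
        simp [Function.comp]
      rw [hok, List.map_map, hsort]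
    · rw [if_neg hband]
      have hok : (okA b ∘ fun c => i :: c) = (fun _ => false) := by
        funext c
        simp [Function.comp, okA, hband]
      rw [hok]
      simp

-- ---- B's product loop computes prodF ----

theorem foldl_product (rest : List (List Int)) :
    ∀ (cs : List (List Int)),
      rest.foldl (fun cs lst => cs.flatMap (fun c => lst.map (fun i => c ++ [i]))) cs =
        cs.flatMap (fun c => (prodF rest).map (fun d => c ++ d)) := by
  induction rest with
  | nil =>
    intro cs
    simp [prodF]
  | cons l r ih =>
    intro cs
    simp only [List.foldl_cons]
    rw [ih]
    simp only [prodF]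
    rw [List.flatMap_assoc]
    apply List.flatMap_congr
    intro c _
    rw [List.flatMap_map, List.map_flatMap]
    apply List.flatMap_congr
    intro i _
    simp [Function.comp, List.map_map, List.append_assoc]

-- ===== VERDICT (by name: the statement is the Claim_ definition above) =====
theorem dfs_spec : Claim_equal_dfs := by
  intro arr b idx cnt q qq _ hpre
  obtain ⟨h0, hlen, hnn⟩ := hpre
  unfold Spec_dfs dfs dfs_alt
  set b0 := b.getD 0
  set i0 := idx.getD 0
  set q0 := q.getD []
  set qq0 := qq.getD []
  have hi0 : (i0.toNat : Int) = i0 := Int.toNat_of_nonneg h0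
  have hkle : i0.toNat ≤ arr.length := by omega
  have hfuel : ((arr.length : Int) - i0).toNat = arr.length - i0.toNat := by omega
  have hA : dfsGo arr ((arr.length : Int) - i0).toNat b0 i0 q0 qq0 =
      qq0 ++ ((prodF (arr.drop i0.toNat)).filter (okA b0)).map
        (fun c => PySem.List.sorted (q0 ++ c) (fun x => x)) := by
    rw [hfuel, ← hi0]
    exact dfsGo_spec arr (arr.drop i0.toNat) i0.toNat b0 q0 qq0 rfl hkle hnn
  rw [hA]
  dsimp only
  rw [PySem.List.slice_from arr h0]
  rw [foldl_product]
  have hsingle :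
      ([[]] : List (List Int)).flatMap
        (fun c => (prodF (arr.drop i0.toNat)).map (fun d => c ++ d)) =
      prodF (arr.drop i0.toNat) := by
    simp
  rw [hsingle]
  rw [PySem.List.foldl_append_if
    (fun c => pvDistinct c && c.all (fun i => pvBitClear b0 i))
    (fun c => PySem.List.sorted (q0 ++ c) (fun x => x))
    (prodF (arr.drop i0.toNat)) qq0]
  congr 1
  congr 1
  apply List.filter_congr
  intro c hc
  have hcnn : ∀ j ∈ c, 0 ≤ j := by
    intro j hj
    obtain ⟨l', hl', hjl'⟩ := mem_prodF hc j hj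
    exact hnn l' hl' j hjl'
  exact (pred_eq_okA b0 c hcnn).symm
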